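-- pv_equiv track=rewrite | github.com/JoeZhao527/mfdesign | final_result_tools/calc_cdr_aar.py | find_cdr_regions
-- ===== SOURCE A (Python) =====
-- def find_cdr_regions(spec_mask):
--     """从spec_mask中找出连续的'1'区域，返回[(start, end), ...]"""
--     regions = []
--     start = None
--     for i, c in enumerate(spec_mask):
--         if c == '1' and start is None:
--             start = i
--         elif c == '0' and start is not None:
--             regions.append((start, i))
--             start = None
--     if start is not None:
--         regions.append((start, len(spec_mask)))
--     return regions
-- ===== SOURCE B (Python) =====
-- def find_cdr_regions(spec_mask):
--     """从spec_mask中找出连续的'1'区域，返回[(start, end), ...]"""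
--     n = len(spec_mask)
--     regions = []
--     i = 0
--     while i < n:
--         if spec_mask[i] == '1':
--             j = i + 1
--             while j < n and spec_mask[j] != '0':
--                 j += 1
--             regions.append((i, j))
--             i = j
--         else:
--             i += 1
--     return regions
-- ===== Notes on version B (the rewrite author's own statement) =====
-- stated objective: alternative
-- what changed: Replaces A's per-character state machine (Option start sentinel plus a final flush after the loop) with a run-jump scan: at each '1' an inner loop finds the end of the whole run at once, the complete region is emitted immediately, and the index jumps past the run, so no cross-iteration state or trailing flush exists.
import Mathlib
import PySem

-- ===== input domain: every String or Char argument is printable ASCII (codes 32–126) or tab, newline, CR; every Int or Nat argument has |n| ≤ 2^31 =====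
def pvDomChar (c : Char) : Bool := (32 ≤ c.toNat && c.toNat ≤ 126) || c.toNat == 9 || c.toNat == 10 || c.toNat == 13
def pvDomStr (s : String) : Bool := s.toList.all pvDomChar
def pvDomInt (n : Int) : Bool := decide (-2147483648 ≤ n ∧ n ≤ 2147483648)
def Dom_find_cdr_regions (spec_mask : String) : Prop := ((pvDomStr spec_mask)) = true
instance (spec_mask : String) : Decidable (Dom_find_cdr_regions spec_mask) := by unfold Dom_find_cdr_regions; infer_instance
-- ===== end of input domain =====

-- B replaces A's one-character-at-a-time state machine (Option start + final flush) by a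
-- run-jump scan that, at each '1', finds the whole run's end at once and emits the complete
-- region; same O(n) cost, different decomposition (objective: alternative).

-- ===== PORT A =====
-- the for-loop over enumerate(spec_mask): state = (regions, start), i the enumerate index
def pvALoop : List (Int × Int) → Option Int → Int → List Char → List (Int × Int) × Option Int
  | regions, start, _, [] => (regions, start)
  | regions, start, i, c :: rest =>
    if c = '1' ∧ start = none then pvALoop regions (some i) (i + 1) rest
    else if c = '0' ∧ start ≠ none then pvALoop (regions ++ [(start.get!, i)]) none (i + 1) rest
    else pvALoop regions start (i + 1) rest

def find_cdr_regions (spec_mask : String) : List (Int × Int) :=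
  match pvALoop [] none 0 spec_mask.toList with
  | (regions, none) => regions
  | (regions, some st) => regions ++ [(st, (PySem.Str.len spec_mask : Int))]

-- ===== PORT B =====
-- inner while loop: number of leading characters ≠ '0' (length of the rest of the run)
def pvRunLen : List Char → Nat
  | [] => 0
  | c :: rest => if c ≠ '0' then pvRunLen rest + 1 else 0

-- outer while loop: at a '1' emit the whole region (i, j) and jump to j, else step by one
def pvBScan (cs : List Char) (i : Int) (regions : List (Int × Int)) : List (Int × Int) :=
  match cs with
  | [] => regions
  | c :: rest =>
    if c = '1' then
      let k := pvRunLen rest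
      pvBScan (rest.drop k) (i + 1 + k) (regions ++ [(i, i + 1 + k)])
    else pvBScan rest (i + 1) regions
termination_by cs.length
decreasing_by
  · exact Nat.lt_succ_of_le (by simp)
  · simp

def find_cdr_regions_alt (spec_mask : String) : List (Int × Int) :=
  pvBScan spec_mask.toList 0 []

-- ===== PRECONDITION & SPEC =====
def Spec_find_cdr_regions (spec_mask : String) (out : List (Int × Int)) : Prop := out = find_cdr_regions_alt spec_mask
instance (spec_mask : String) (out : List (Int × Int)) : Decidable (Spec_find_cdr_regions spec_mask out) := by unfold Spec_find_cdr_regions; infer_instance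

-- ===== CLAIM (what is proved, stated in full; the proofs are below) =====
def Claim_equal_find_cdr_regions : Prop := ∀ (spec_mask : String), Dom_find_cdr_regions spec_mask → Spec_find_cdr_regions spec_mask (find_cdr_regions spec_mask)

-- ===== LEMMAS AND PROOFS =====

-- A's loop result followed by the final flush at end index e
def pvFlush : List (Int × Int) × Option Int → Int → List (Int × Int)
  | (regions, none), _ => regions
  | (regions, some st), e => regions ++ [(st, e)]

theorem pvMain (cs : List Char) :
    (∀ (i : Int) (regions : List (Int × Int)),
      pvFlush (pvALoop regions none i cs) (i + cs.length) = pvBScan cs i regions) ∧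
    (∀ (i : Int) (regions : List (Int × Int)) (st : Int),
      pvFlush (pvALoop regions (some st) i cs) (i + cs.length)
        = pvBScan (cs.drop (pvRunLen cs)) (i + pvRunLen cs) (regions ++ [(st, i + pvRunLen cs)])) := by
  induction cs with
  | nil => constructor <;> intros <;> simp [pvALoop, pvBScan, pvRunLen, pvFlush]
  | cons c rest ih =>
    obtain ⟨ih1, ih2⟩ := ih
    constructor
    · intro i regions
      by_cases h1 : c = '1'
      · rw [show pvALoop regions none i (c :: rest) = pvALoop regions (some i) (i + 1) rest by
          simp [pvALoop, h1]]
        have := ih2 (i + 1) regions i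
        rw [show (i : Int) + ((c :: rest).length : Nat) = (i + 1) + (rest.length : Nat) by
          push_cast [List.length_cons]; ring]
        rw [this]
        simp only [pvBScan, if_pos h1]
      · rw [show pvALoop regions none i (c :: rest) = pvALoop regions none (i + 1) rest by
          simp [pvALoop, h1]]
        have := ih1 (i + 1) regions
        rw [show (i : Int) + ((c :: rest).length : Nat) = (i + 1) + (rest.length : Nat) by
          push_cast [List.length_cons]; ring]
        rw [this]
        simp [pvBScan, h1]
    · intro i regions st
      by_cases h0 : c = '0'
      · rw [show pvALoop regions (some st) i (c :: rest)
            = pvALoop (regions ++ [(st, i)]) none (i + 1) rest by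
          simp [pvALoop, h0]]
        have := ih1 (i + 1) (regions ++ [(st, i)])
        rw [show (i : Int) + ((c :: rest).length : Nat) = (i + 1) + (rest.length : Nat) by
          push_cast [List.length_cons]; ring]
        rw [this]
        simp [pvRunLen, pvBScan, h0]
      · rw [show pvALoop regions (some st) i (c :: rest)
            = pvALoop regions (some st) (i + 1) rest by
          simp [pvALoop, h0]]
        have := ih2 (i + 1) regions st
        rw [show (i : Int) + ((c :: rest).length : Nat) = (i + 1) + (rest.length : Nat) by
          push_cast [List.length_cons]; ring]
        rw [this]
        rw [show pvRunLen (c :: rest) = pvRunLen rest + 1 by simp [pvRunLen, h0]]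
        rw [show (c :: rest).drop (pvRunLen rest + 1) = rest.drop (pvRunLen rest) by simp]
        congr 1 <;> push_cast <;> ring_nf

-- ===== VERDICT (by name: the statement is the Claim_ definition above) =====
theorem find_cdr_regions_spec : Claim_equal_find_cdr_regions := by
  intro s _
  show find_cdr_regions s = find_cdr_regions_alt s
  have h := (pvMain s.toList).1 0 []
  simp only [zero_add] at h
  unfold find_cdr_regions find_cdr_regions_alt
  rw [← h]
  rcases hA : pvALoop [] none 0 s.toList with ⟨regions, start⟩
  cases start <;> simp [pvFlush, PySem.Str.len_eq]
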